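-- pv_equiv track=rewrite | github.com/NeuralNetworkVerification/Marabou | maraboupy/CnnAbs.py | linearStep
-- ===== SOURCE A (Python) =====
-- def linearStep(n, stepSize=10, startWith=50):
--     stepSize = max(stepSize,1)
--     startWith = max(startWith,0)
--     size = n
--     yield startWith
--     size -= startWith
--     while size > 0:
--         toAdd = min(size, stepSize)
--         yield toAdd
--         size -= toAdd
-- ===== SOURCE B (Python) =====
-- def linearStep(n, stepSize=10, startWith=50):
--     stepSize = max(stepSize, 1)
--     startWith = max(startWith, 0)
--     yield startWith
--     remaining = n - startWith
--     if remaining > 0: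
--         full, rem = divmod(remaining, stepSize)
--         for _ in range(full):
--             yield stepSize
--         if rem:
--             yield rem
-- ===== Notes on version B (the rewrite author's own statement) =====
-- stated objective: alternative
-- what changed: Replaces the repeated-subtraction while-loop by a single divmod that determines the number of full chunks and the final partial chunk arithmetically, emitting the full chunks by replication.
import Mathlib
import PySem

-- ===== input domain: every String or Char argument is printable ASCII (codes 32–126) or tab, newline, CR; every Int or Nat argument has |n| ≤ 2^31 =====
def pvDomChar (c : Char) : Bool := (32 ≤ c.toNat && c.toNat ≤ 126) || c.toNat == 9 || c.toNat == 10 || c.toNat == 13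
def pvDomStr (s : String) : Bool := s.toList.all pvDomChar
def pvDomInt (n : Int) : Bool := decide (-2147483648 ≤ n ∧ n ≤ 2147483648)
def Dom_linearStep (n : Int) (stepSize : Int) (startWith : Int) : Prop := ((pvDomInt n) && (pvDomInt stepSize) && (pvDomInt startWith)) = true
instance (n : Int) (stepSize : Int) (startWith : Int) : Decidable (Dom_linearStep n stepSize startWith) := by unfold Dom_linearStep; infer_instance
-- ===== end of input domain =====

-- B replaces A's repeated-subtraction while-loop by a single divmod that determines the
-- chunk count and final partial chunk arithmetically (objective: alternative algorithm).
-- Both Pythons are generators; the ports return the list of yielded values.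

-- ===== PORT A =====
-- A's while-loop; A applies `max stepSize 1` once before the loop, the loop carries that
-- value unchanged, so the port recomputes the same `max stepSize 1` at each iteration
-- (value-identical; it makes termination provable without a side hypothesis).
def linearStepLoop (stepSize : Int) (size : Int) : List Int :=
  if _h : 0 < size then
    (min size (max stepSize 1)) :: linearStepLoop stepSize (size - min size (max stepSize 1))
  else []
termination_by size.toNat
decreasing_by omega

def linearStep (n : Int) (stepSize : Int) (startWith : Int) : List Int :=
  let startWith' := max startWith 0
  startWith' :: linearStepLoop stepSize (n - startWith')

-- ===== PORT B =====
def linearStep_alt (n : Int) (stepSize : Int) (startWith : Int) : List Int :=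
  let s := max stepSize 1
  let st := max startWith 0
  let remaining := n - st
  if 0 < remaining then
    let full := PySem.Int.floordiv remaining s
    let rem := PySem.Int.mod remaining s
    st :: (List.replicate full.toNat s ++ (if rem ≠ 0 then [rem] else []))
  else [st]

-- ===== PRECONDITION & SPEC =====
def Spec_linearStep (n : Int) (stepSize : Int) (startWith : Int) (out : List Int) : Prop := out = linearStep_alt n stepSize startWith
instance (n : Int) (stepSize : Int) (startWith : Int) (out : List Int) : Decidable (Spec_linearStep n stepSize startWith out) := by unfold Spec_linearStep; infer_instance

-- ===== CLAIM (what is proved, stated in full; the proofs are below) =====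
def Claim_equal_linearStep : Prop := ∀ (n : Int) (stepSize : Int) (startWith : Int), Dom_linearStep n stepSize startWith → Spec_linearStep n stepSize startWith (linearStep n stepSize startWith)

-- ===== LEMMAS AND PROOFS =====

theorem loop_eq (stepSize size : Int) (h : 0 < size) :
    linearStepLoop stepSize size =
      List.replicate (PySem.Int.floordiv size (max stepSize 1)).toNat (max stepSize 1) ++
        (if PySem.Int.mod size (max stepSize 1) ≠ 0 then [PySem.Int.mod size (max stepSize 1)] else []) := by
  set s := max stepSize 1 with hs
  have hs1 : 1 ≤ s := le_max_right _ _
  fun_induction linearStepLoop stepSize size with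
  | case1 size hpos ih =>
    rw [← hs] at ih ⊢
    by_cases hle : size ≤ s
    · -- last (or only) chunk: toAdd = size, loop stops next round
      have hmin : min size s = size := min_eq_left hle
      rw [hmin, sub_self]
      rw [linearStepLoop]; simp only [lt_irrefl, dite_false]
      by_cases heq : size = s
      · have hfd : PySem.Int.floordiv size s = 1 := by
          rw [PySem.Int.floordiv_eq_iff_of_pos (by omega)]
          constructor
          · nlinarith
          · nlinarith
        have hmod : PySem.Int.mod size s = 0 := by
          have := PySem.Int.floordiv_mul_add_mod size s
          rw [hfd] at this; omega
        rw [hfd, hmod]; simp [heq]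
      · have hlt : size < s := lt_of_le_of_ne hle heq
        have hfd : PySem.Int.floordiv size s = 0 := by
          rw [PySem.Int.floordiv_eq_iff_of_pos (by omega)]
          constructor <;> linarith
        have hmod : PySem.Int.mod size s = size := by
          have := PySem.Int.floordiv_mul_add_mod size s
          rw [hfd] at this; omega
        rw [hfd, hmod]
        simp only [Int.toNat_zero, List.replicate_zero, List.nil_append]
        rw [if_pos (show size ≠ 0 by omega)]
    · -- full chunk: toAdd = s, recurse
      have hlt : s < size := lt_of_not_ge hle
      have hmin : min size s = s := min_eq_right (le_of_lt hlt)
      rw [hmin]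
      have hpos' : 0 < size - s := by omega
      rw [hmin] at ih
      rw [ih hpos']
      set q := PySem.Int.floordiv (size - s) s with hq
      have hdecomp := PySem.Int.floordiv_mul_add_mod (size - s) s
      have hr0 : 0 ≤ PySem.Int.mod (size - s) s := PySem.Int.mod_nonneg _ (by omega)
      have hrlt : PySem.Int.mod (size - s) s < s := PySem.Int.mod_lt _ (by omega)
      set r := PySem.Int.mod (size - s) s with hrdef
      rw [← hq] at hdecomp
      have hqnn : 0 ≤ q := by
        by_contra hneg
        have hq1 : q ≤ -1 := by omega
        have : q * s ≤ -1 * s := mul_le_mul_of_nonneg_right hq1 (by omega)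
        nlinarith
      have hfd : PySem.Int.floordiv size s = q + 1 := by
        rw [PySem.Int.floordiv_eq_iff_of_pos (by omega)]
        constructor <;> nlinarith
      have hmod : PySem.Int.mod size s = r := by
        have := PySem.Int.floordiv_mul_add_mod size s
        rw [hfd] at this; nlinarith
      rw [hfd, hmod]
      have : (q + 1).toNat = q.toNat + 1 := by omega
      rw [this, List.replicate_succ]
      simp
  | case2 size hnpos => omega

theorem linearStep_spec : Claim_equal_linearStep := by
  intro n stepSize startWith _
  unfold Spec_linearStep linearStep linearStep_alt
  simp only []
  set st := max startWith 0
  by_cases h : 0 < n - st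
  · rw [if_pos h, loop_eq stepSize (n - st) h]
  · rw [if_neg h, linearStepLoop]
    simp only [dif_neg h]
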